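-- pv_equiv track=rewrite | github.com/DinIskakov/Yt-Analysis | creator-discovery.py | select_candidate_ids
-- ===== SOURCE A (Python) =====
-- from typing import Dict, List, Set, Iterable, Optional, Tuple
--
-- def select_candidate_ids(
--     hit_counts: Dict[str, int],
--     min_hits: int,
--     max_candidates: int,
-- ) -> List[str]:
--     candidates = [(cid, hits) for cid, hits in hit_counts.items() if hits >= min_hits]
--     candidates.sort(key=lambda item: item[1], reverse=True)
--     if max_candidates and len(candidates) > max_candidates:
--         candidates = candidates[:max_candidates]
--     return [cid for cid, _ in candidates]
-- ===== SOURCE B (Python) =====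
-- def select_candidate_ids(hit_counts, min_hits, max_candidates):
--     buckets = {}
--     for cid, hits in hit_counts.items():
--         if hits >= min_hits:
--             buckets.setdefault(hits, []).append(cid)
--     result = []
--     for hits in sorted(buckets, reverse=True):
--         result.extend(buckets[hits])
--     if max_candidates and len(result) > max_candidates:
--         result = result[:max_candidates]
--     return result
-- ===== Notes on version B (the rewrite author's own statement) =====
-- stated objective: alternative
-- what changed: Replaces the build-pairs/sort-pairs/slice/project pipeline by a bucket grouping: one pass groups qualifying ids into a dict keyed by hit count, then the distinct hit values are sorted descending and the buckets concatenated in that order (stability comes for free from insertion order), capping at the end.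
import Mathlib
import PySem

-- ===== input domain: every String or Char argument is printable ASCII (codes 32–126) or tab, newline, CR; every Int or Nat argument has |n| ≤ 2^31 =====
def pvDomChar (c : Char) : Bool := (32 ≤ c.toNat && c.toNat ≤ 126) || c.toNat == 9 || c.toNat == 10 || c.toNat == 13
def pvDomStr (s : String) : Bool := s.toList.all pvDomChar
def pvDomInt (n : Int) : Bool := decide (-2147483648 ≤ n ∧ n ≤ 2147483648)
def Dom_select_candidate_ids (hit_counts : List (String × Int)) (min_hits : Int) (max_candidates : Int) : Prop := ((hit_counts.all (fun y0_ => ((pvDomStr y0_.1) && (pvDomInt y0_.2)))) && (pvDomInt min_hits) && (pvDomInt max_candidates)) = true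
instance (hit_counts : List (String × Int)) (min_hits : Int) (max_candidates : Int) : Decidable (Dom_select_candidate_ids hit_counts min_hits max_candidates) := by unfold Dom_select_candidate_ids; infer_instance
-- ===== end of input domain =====

-- B replaces A's build-pairs/sort-pairs/slice/project pipeline by one grouping pass into a
-- dict of per-hit-count buckets, concatenated over the distinct hit values in descending
-- order (insertion order keeps ties stable), capping at the end — an alternative algorithm.

-- ===== PORT A =====
def select_candidate_ids (hit_counts : List (String × Int)) (min_hits : Int) (max_candidates : Int) : List String :=
  -- candidates = [(cid, hits) for cid, hits in hit_counts.items() if hits >= min_hits]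
  let candidates := hit_counts.filter (fun p => decide (min_hits ≤ p.2))
  -- candidates.sort(key=lambda item: item[1], reverse=True)
  let candidates := PySem.List.sorted candidates (fun p => p.2) true
  -- if max_candidates and len(candidates) > max_candidates: candidates = candidates[:max_candidates]
  let candidates :=
    if max_candidates ≠ 0 ∧ max_candidates < (candidates.length : Int)
    then PySem.List.slice candidates none (some max_candidates)
    else candidates
  -- return [cid for cid, _ in candidates]
  candidates.map (fun p => p.1)

-- ===== PORT B =====
def select_candidate_ids_alt (hit_counts : List (String × Int)) (min_hits : Int) (max_candidates : Int) : List String :=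
  -- for cid, hits in hit_counts.items(): if hits >= min_hits: buckets.setdefault(hits, []).append(cid)
  let buckets : PySem.Dict Int (List String) :=
    hit_counts.foldl
      (fun d p => if min_hits ≤ p.2 then d.modify p.2 [] (fun l => l ++ [p.1]) else d)
      PySem.Dict.empty
  -- for hits in sorted(buckets, reverse=True): result.extend(buckets[hits])
  let result :=
    (PySem.List.sorted buckets.keys (fun k => k) true).foldl
      (fun acc k => acc ++ buckets.getD k []) []
  -- if max_candidates and len(result) > max_candidates: result = result[:max_candidates]
  if max_candidates ≠ 0 ∧ max_candidates < (result.length : Int)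
  then PySem.List.slice result none (some max_candidates)
  else result

-- ===== PRECONDITION & SPEC =====
def Spec_select_candidate_ids (hit_counts : List (String × Int)) (min_hits : Int) (max_candidates : Int) (out : List String) : Prop := out = select_candidate_ids_alt hit_counts min_hits max_candidates
instance (hit_counts : List (String × Int)) (min_hits : Int) (max_candidates : Int) (out : List String) : Decidable (Spec_select_candidate_ids hit_counts min_hits max_candidates out) := by unfold Spec_select_candidate_ids; infer_instance

-- ===== CLAIM (what is proved, stated in full; the proofs are below) =====
def Claim_equal_select_candidate_ids : Prop := ∀ (hit_counts : List (String × Int)) (min_hits : Int) (max_candidates : Int), Dom_select_candidate_ids hit_counts min_hits max_candidates → Spec_select_candidate_ids hit_counts min_hits max_candidates (select_candidate_ids hit_counts min_hits max_candidates)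

-- ===== LEMMAS AND PROOFS =====

theorem insertBy_nil {α : Type} (bef : α → α → Bool) (x : α) :
    PySem.List.insertBy bef x [] = [x] := rfl

theorem insertBy_cons {α : Type} (bef : α → α → Bool) (x y : α) (t : List α) :
    PySem.List.insertBy bef x (y :: t) =
      if bef x y then x :: y :: t else y :: PySem.List.insertBy bef x t := rfl

theorem insertBy_skip {α : Type} (bef : α → α → Bool) (x : α) (as bs : List α)
    (h : ∀ y ∈ as, bef x y = false) :
    PySem.List.insertBy bef x (as ++ bs) = as ++ PySem.List.insertBy bef x bs := by
  induction as with
  | nil => simp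
  | cons a t ih =>
    have ha := h a (by simp)
    simp [insertBy_cons, ha, ih (fun y hy => h y (by simp [hy]))]

theorem insertBy_all {α : Type} (bef : α → α → Bool) (x : α) (zs : List α)
    (h : ∀ y ∈ zs, bef x y = true) :
    PySem.List.insertBy bef x zs = x :: zs := by
  cases zs with
  | nil => rfl
  | cons z t => simp [insertBy_cons, h z (by simp)]

-- insertion of x into a descending bucket concatenation, when key x is an existing bucket:
-- x lands at the end of its own bucket.
theorem insert_mem_flatMap {α : Type} (key : α → Int) (x : α) (ks : List Int) (f : Int → List α)
    (hdesc : ks.Pairwise (fun a b => b < a))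
    (hf : ∀ k' ∈ ks, ∀ y ∈ f k', key y = k')
    (hk : key x ∈ ks) :
    PySem.List.insertBy (fun a b => decide (key b < key a)) x (ks.flatMap f)
      = ks.flatMap (fun k' => if k' = key x then f k' ++ [x] else f k') := by
  induction ks with
  | nil => cases hk
  | cons k0 rest ih =>
    have hrest : ∀ b ∈ rest, b < k0 := (List.pairwise_cons.mp hdesc).1
    simp only [List.flatMap_cons]
    by_cases h0 : k0 = key x
    · have hskip : ∀ y ∈ f k0, (decide (key y < key x) : Bool) = false := by
        intro y hy
        have := hf k0 (by simp) y hy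
        simp [this, h0]
      rw [insertBy_skip _ _ _ _ hskip]
      have hall : ∀ y ∈ rest.flatMap f, (decide (key y < key x) : Bool) = true := by
        intro y hy
        obtain ⟨k', hk', hyk'⟩ := List.mem_flatMap.mp hy
        have hkey := hf k' (by simp [hk']) y hyk'
        have : k' < k0 := hrest k' hk'
        simp [hkey]; omega
      rw [insertBy_all _ _ _ hall]
      have hnone : rest.flatMap (fun k' => if k' = key x then f k' ++ [x] else f k')
          = rest.flatMap f := by
        apply List.flatMap_congr
        intro k' hk'
        have : k' < k0 := hrest k' hk'
        have : k' ≠ key x := by omega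
        simp [this]
      simp [h0, hnone]
    · have hkrest : key x ∈ rest := by
        rcases List.mem_cons.mp hk with h | h
        · exact absurd h.symm h0
        · exact h
      have hxk0 : key x < k0 := hrest _ hkrest
      have hskip : ∀ y ∈ f k0, (decide (key y < key x) : Bool) = false := by
        intro y hy
        have := hf k0 (by simp) y hy
        simp [this]; omega
      rw [insertBy_skip _ _ _ _ hskip,
        ih (List.pairwise_cons.mp hdesc).2 (fun k' h' => hf k' (by simp [h'])) hkrest]
      have : ¬ k0 = key x := h0
      simp [this]

-- insertion of x into a descending bucket concatenation, when key x is a fresh key: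
-- x opens a new singleton bucket exactly where key x is inserted among the keys.
theorem insert_not_mem_flatMap {α : Type} (key : α → Int) (x : α) (ks : List Int) (f : Int → List α)
    (hdesc : ks.Pairwise (fun a b => b < a))
    (hf : ∀ k' ∈ ks, ∀ y ∈ f k', key y = k')
    (hk : key x ∉ ks) :
    PySem.List.insertBy (fun a b => decide (key b < key a)) x (ks.flatMap f)
      = (PySem.List.insertBy (fun a b => decide (b < a)) (key x) ks).flatMap
          (fun k' => if k' = key x then [x] else f k') := by
  induction ks with
  | nil => simp [insertBy_nil]
  | cons k0 rest ih =>
    have hrest : ∀ b ∈ rest, b < k0 := (List.pairwise_cons.mp hdesc).1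
    have hne0 : key x ≠ k0 := by intro h; exact hk (by simp [h])
    by_cases hlt : k0 < key x
    · have hall : ∀ y ∈ (k0 :: rest).flatMap f, (decide (key y < key x) : Bool) = true := by
        intro y hy
        obtain ⟨k', hk', hyk'⟩ := List.mem_flatMap.mp hy
        have hkey := hf k' hk' y hyk'
        have : k' ≤ k0 := by
          rcases List.mem_cons.mp hk' with h | h
          · omega
          · have := hrest k' h; omega
        simp [hkey]; omega
      rw [insertBy_all _ _ _ hall, insertBy_cons]
      have : (decide (k0 < key x) : Bool) = true := by simp [hlt]
      rw [this]
      simp only [List.flatMap_cons]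
      have : (k0 :: rest).flatMap (fun k' => if k' = key x then [x] else f k')
          = (k0 :: rest).flatMap f := by
        apply List.flatMap_congr
        intro k' hk'
        have : k' ≠ key x := by
          intro h; exact hk (h ▸ hk')
        simp [this]
      simp only [List.flatMap_cons] at this
      simp [this]
    · have hxlt : key x < k0 := by
        rcases lt_trichotomy (key x) k0 with h | h | h
        · exact h
        · exact absurd h hne0
        · exact absurd h hlt
      have hskip : ∀ y ∈ f k0, (decide (key y < key x) : Bool) = false := by
        intro y hy
        have := hf k0 (by simp) y hy
        simp [this]; omega
      simp only [List.flatMap_cons]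
      rw [insertBy_skip _ _ _ _ hskip,
        ih (List.pairwise_cons.mp hdesc).2 (fun k' h' => hf k' (by simp [h']))
          (fun h => hk (by simp [h])), insertBy_cons]
      have : (decide (k0 < key x) : Bool) = false := by simp; omega
      rw [this]
      simp [hne0.symm]

theorem sorted_desc_keys_pairwise {κ : Type} [LinearOrder κ] [BEq κ] [LawfulBEq κ] (xs : List κ) :
    (PySem.List.sorted (PySem.Set.ofList xs) (fun k => k) true).Pairwise (fun a b => b < a) := by
  have hle := PySem.List.sorted_pairwise_rev (PySem.Set.ofList xs) (fun k => k)
  have hnd : (PySem.List.sorted (PySem.Set.ofList xs) (fun k => k) true).Nodup :=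
    (PySem.List.sorted_perm (PySem.Set.ofList xs) (fun k => k) true).nodup_iff.mpr
      (PySem.Set.nodup_ofList xs)
  exact (hle.and hnd).imp (fun h => lt_of_le_of_ne h.1 (Ne.symm h.2))

-- THE KEY LEMMA: Python's stable descending sort by an Int key is the concatenation,
-- over the distinct key values in descending order, of the per-key filters in input order.
theorem sorted_rev_eq_buckets {α : Type} (key : α → Int) (l : List α) :
    PySem.List.sorted l key true
      = (PySem.List.sorted (PySem.Set.ofList (l.map key)) (fun k => k) true).flatMap
          (fun k => l.filter (fun y => key y == k)) := by
  induction l using List.reverseRecOn with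
  | nil => rfl
  | append_singleton t x ih =>
    have hstep : PySem.List.sorted (t ++ [x]) key true
        = PySem.List.insertBy (fun a b => decide (key b < key a)) x (PySem.List.sorted t key true) := by
      rw [PySem.List.sorted_rev_eq_foldl_insertBy, PySem.List.sorted_rev_eq_foldl_insertBy,
        List.foldl_append]
      rfl
    set ks := PySem.List.sorted (PySem.Set.ofList (t.map key)) (fun k => k) true with hks
    have hdesc : ks.Pairwise (fun a b => b < a) := sorted_desc_keys_pairwise _
    have hf : ∀ k' ∈ ks, ∀ y ∈ t.filter (fun y => key y == k'), key y = k' := by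
      intro k' _ y hy
      simpa using (List.of_mem_filter hy)
    have hsetstep : PySem.Set.ofList ((t ++ [x]).map key)
        = PySem.Set.add (PySem.Set.ofList (t.map key)) (key x) := by
      rw [PySem.Set.ofList_eq_foldl, PySem.Set.ofList_eq_foldl]
      simp [List.foldl_append]
    by_cases hmem : key x ∈ t.map key
    · -- existing key: same buckets, x appended to its own bucket
      have hcont : (PySem.Set.ofList (t.map key)).contains (key x) = true := by
        simp [PySem.Set.contains]
        obtain ⟨a, ha, hka⟩ := List.mem_map.mp hmem
        exact ⟨a, ha, hka⟩
      have hset : PySem.Set.ofList ((t ++ [x]).map key) = PySem.Set.ofList (t.map key) := by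
        rw [hsetstep]
        unfold PySem.Set.add
        rw [hcont]
        simp
      have hkmem : key x ∈ ks := by
        rw [hks, PySem.List.mem_sorted]
        exact (PySem.Set.mem_ofList _ _).mpr hmem
      rw [hstep, ih, insert_mem_flatMap key x ks _ hdesc hf hkmem, hset, ← hks]
      apply List.flatMap_congr
      intro k' _
      by_cases h' : k' = key x
      · simp [h', List.filter_append]
      · have : ¬ (key x == k') = true := by simp; exact fun h => h' h.symm
        simp [h', List.filter_append, this]
    · -- fresh key: key x is inserted among the keys with a singleton bucket
      have hcont : (PySem.Set.ofList (t.map key)).contains (key x) = false := by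
        simp [PySem.Set.contains]
        intro a ha h
        exact hmem (h ▸ List.mem_map_of_mem ha)
      have hset : PySem.Set.ofList ((t ++ [x]).map key)
          = PySem.Set.ofList (t.map key) ++ [key x] := by
        rw [hsetstep]
        unfold PySem.Set.add
        rw [hcont]
        simp
      have hkmem : key x ∉ ks := by
        rw [hks, PySem.List.mem_sorted]
        exact fun h => hmem ((PySem.Set.mem_ofList _ _).mp h)
      have hsortstep : PySem.List.sorted (PySem.Set.ofList ((t ++ [x]).map key)) (fun k => k) true
          = PySem.List.insertBy (fun a b => decide (b < a)) (key x) ks := by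
        rw [hset, hks, PySem.List.sorted_rev_eq_foldl_insertBy,
          PySem.List.sorted_rev_eq_foldl_insertBy, List.foldl_append]
        rfl
      rw [hstep, ih, insert_not_mem_flatMap key x ks _ hdesc hf hkmem, hsortstep]
      apply List.flatMap_congr
      intro k' hk'
      have hk'cases := (PySem.List.mem_insertBy _ _ _ _).mp hk'
      by_cases h' : k' = key x
      · have hempty : t.filter (fun y => key y == k') = [] := by
          rw [List.filter_eq_nil_iff]
          intro y hy
          simp only [beq_iff_eq, h']
          intro hk
          exact hmem (hk ▸ List.mem_map_of_mem hy)
        subst h'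
        rw [List.filter_append, hempty]
        simp
      · have hne : ¬ (key x == k') = true := by simp; exact fun h => h' h.symm
        simp [h', List.filter_append, hne]

theorem slice_to_map {α β : Type} (f : α → β) (xs : List α) (b : Int) :
    PySem.List.slice (xs.map f) none (some b) = (PySem.List.slice xs none (some b)).map f := by
  simp [PySem.List.slice, List.map_take]

theorem select_candidate_ids_eq_alt (hit_counts : List (String × Int)) (min_hits max_candidates : Int) :
    select_candidate_ids hit_counts min_hits max_candidates
      = select_candidate_ids_alt hit_counts min_hits max_candidates := by
  unfold select_candidate_ids select_candidate_ids_alt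
  set fl := hit_counts.filter (fun p => decide (min_hits ≤ p.2)) with hfl
  -- B's grouping loop, as a dict
  have hfold : hit_counts.foldl
      (fun d p => if min_hits ≤ p.2 then d.modify p.2 [] (fun l => l ++ [p.1]) else d)
      PySem.Dict.empty
      = fl.foldl (fun d p => d.modify p.2 [] (fun l => l ++ [p.1])) PySem.Dict.empty :=
    PySem.List.foldl_ite_eq_foldl_filter (p := fun p : String × Int => min_hits ≤ p.2)
      (f := fun (d : PySem.Dict Int (List String)) p => d.modify p.2 [] (fun l => l ++ [p.1]))
      hit_counts PySem.Dict.empty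
  set buckets := fl.foldl (fun d p => d.modify p.2 [] (fun l => l ++ [p.1])) PySem.Dict.empty
    with hbuckets
  -- each bucket is the per-key filter of fl, projected to ids
  have hgetD : ∀ k : Int, buckets.getD k []
      = (fl.filter (fun p => p.2 == k)).map (fun p => p.1) := by
    intro k
    have hswap : buckets = (fl.map Prod.swap).foldl
        (fun d q => d.modify q.1 [] (fun l => l ++ [q.2])) PySem.Dict.empty := by
      rw [hbuckets, List.foldl_map]
      rfl
    rw [hswap, PySem.Dict.getD_foldl_modify_append]
    have : (fl.map Prod.swap).filter (fun q => q.1 == k)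
        = (fl.filter (fun p => p.2 == k)).map Prod.swap := by
      rw [List.filter_map]; rfl
    rw [this]
    simp [PySem.Dict.getD_empty, List.map_map, Function.comp, Prod.swap]
  -- the keys of the dict are exactly the distinct hit values, in first-occurrence order
  have hkeys : buckets.keys = PySem.Set.ofList (fl.map (fun p => p.2)) := by
    rw [hbuckets]
    have := PySem.Dict.keys_foldl_modify_key fl (fun p => p.2) ([] : List String)
      (fun _ p => fun l => l ++ [p.1]) PySem.Dict.empty
    simp only at this
    rw [this]
    simp [PySem.Set.update, PySem.Set.ofList_eq_foldl, PySem.Dict.keys_empty]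
  -- B's concatenation loop = the bucket decomposition of A's stable sort
  have hresult : (PySem.List.sorted buckets.keys (fun k => k) true).foldl
        (fun acc k => acc ++ buckets.getD k []) []
      = (PySem.List.sorted fl (fun p => p.2) true).map (fun p => p.1) := by
    rw [PySem.List.foldl_append_eq_flatMap, List.nil_append,
      sorted_rev_eq_buckets (fun p => p.2) fl, List.map_flatMap, hkeys]
    apply List.flatMap_congr
    intro k _
    rw [hgetD k]
  simp only [hfold, hresult, List.length_map]
  by_cases hc : max_candidates ≠ 0 ∧
      max_candidates < ((PySem.List.sorted fl (fun p => p.2) true).length : Int)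
  · simp only [if_pos hc, slice_to_map]
  · simp only [if_neg hc]

-- ===== VERDICT (by name: the statement is the Claim_ definition above) =====
theorem select_candidate_ids_spec : Claim_equal_select_candidate_ids := by
  intro hit_counts min_hits max_candidates _
  unfold Spec_select_candidate_ids
  exact select_candidate_ids_eq_alt hit_counts min_hits max_candidates
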